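-- pv_equiv track=rewrite | github.com/SamHames/hyperreal | hyperreal/utilities.py | approximate_positions_with_sentinels
-- ===== SOURCE A (Python) =====
-- def approximate_positions_with_sentinels(values, position_window_size):
--     """
--     Turn a Sequence of values into a generator of (position_bucket, value).
--
--     This function handles None as sentinel values to enforce position breaks
--     and the rounding of position values.
--
--     Examples:
--
--     This is position_window_size = 1, which is the exact position case.
--
--     >>> list(approximate_positions_with_sentinels(['the', 'cat', 'sat'], 1))
--     [(0, 'the'), (1, 'cat'), (2, 'sat')]
--
--     Approximate positions (position_window_size > 1) accumulate multiple
--     values into the same position as in the following examples for 2, 3: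
--
--     >>> list(approximate_positions_with_sentinels(['the', 'cat', 'sat'], 2))
--     [(0, 'the'), (0, 'cat'), (1, 'sat')]
--
--     >>> values = "the cat sat on the mat".split()
--     >>> list(approximate_positions_with_sentinels(values, 3))
--     [(0, 'the'), (0, 'cat'), (0, 'sat'), (1, 'on'), (1, 'the'), (1, 'mat')]
--
--     'None' values are sentinel markers to terminate the position bucket
--     earlier. This can be used to control breaking more finely in a stream
--     of tokens than would otherwise be possible.
--
--     >>> values.insert(3, None)
--     >>> list(approximate_positions_with_sentinels(values, 2))
--     [(0, 'the'), (0, 'cat'), (1, 'sat'), (2, 'on'), (2, 'the'), (3, 'mat')]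
--
--     Lastly a negative position value only changes position at sentinel None's.
--     This allows you to control everything about the procedure.
--
--     >>> list(approximate_positions_with_sentinels(values, -2))
--     [(0, 'the'), (0, 'cat'), (0, 'sat'), (1, 'on'), (1, 'the'), (1, 'mat')]
--
--     """
--
--     current_position = 0
--     current_size = 0
--
--     for value in values:
--         if value is None:
--             # If we've placed anything in the current bucket, we
--             # need to advance the position counter - otherwise
--             # we can just keep advancing. This turns consecutive
--             # sentinels into a single sentinel.
--             if current_size:
--                 current_position += 1
--                 current_size = 0
--
--             continue
--
--         current_size += 1
--
--         yield (current_position, value)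
--
--         if current_size == position_window_size:
--             current_position += 1
--             current_size = 0
-- ===== SOURCE B (Python) =====
-- def approximate_positions_with_sentinels(values, position_window_size):
--     w = position_window_size
--     # split the stream into the maximal runs of non-None values
--     runs = []
--     current = []
--     for value in values:
--         if value is None:
--             if current:
--                 runs.append(current)
--                 current = []
--         else:
--             current.append(value)
--     if current:
--         runs.append(current)
--     # emit each run chunked into windows of size w, advancing start per run
--     start = 0
--     for run in runs:
--         for i, value in enumerate(run):
--             yield (start + (i // w if w >= 1 else 0), value)
--         start += (len(run) + w - 1) // w if w >= 1 else 1
-- ===== Notes on version B (the rewrite author's own statement) =====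
-- stated objective: alternative
-- what changed: Replaces A's flat stateful scan (bucket position + in-bucket counter mutated per element) by a two-level decomposition: first split the stream into maximal runs of non-None values, then emit each run with positions computed by index division (start + i // w) and advance start by the ceil of run length over the window.
import Mathlib
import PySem

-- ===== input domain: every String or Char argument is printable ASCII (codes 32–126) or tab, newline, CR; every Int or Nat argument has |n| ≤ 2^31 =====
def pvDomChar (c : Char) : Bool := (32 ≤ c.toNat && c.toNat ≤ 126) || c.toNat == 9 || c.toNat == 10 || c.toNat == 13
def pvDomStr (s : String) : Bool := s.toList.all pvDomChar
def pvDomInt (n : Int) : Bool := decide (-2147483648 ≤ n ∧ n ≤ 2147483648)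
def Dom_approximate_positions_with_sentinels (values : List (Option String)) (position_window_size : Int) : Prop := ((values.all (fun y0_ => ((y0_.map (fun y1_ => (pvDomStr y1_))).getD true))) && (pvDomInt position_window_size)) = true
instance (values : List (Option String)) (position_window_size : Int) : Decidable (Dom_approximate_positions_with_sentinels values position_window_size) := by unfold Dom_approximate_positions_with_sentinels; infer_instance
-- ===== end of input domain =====

-- B replaces A's flat stateful scan by a group-into-runs-then-chunk-by-division decomposition (alternative, same cost).


-- ===== PORT A =====
-- state = (current_position, current_size, emitted pairs); the generator's yields are collected in order
def approximate_positions_with_sentinels (values : List (Option String)) (position_window_size : Int) : List (Int × String) :=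
  (values.foldl (fun (st : Int × Int × List (Int × String)) value =>
      match value with
      | none => if st.2.1 ≠ 0 then (st.1 + 1, 0, st.2.2) else st
      | some v =>
        let current_size := st.2.1 + 1
        let out := st.2.2 ++ [(st.1, v)]
        if current_size = position_window_size then (st.1 + 1, 0, out) else (st.1, current_size, out))
    (0, 0, [])).2.2

-- ===== PORT B =====
-- Source B's first loop: split into maximal runs of non-None values
def pvSplitRuns (values : List (Option String)) : List (List String) :=
  let st := values.foldl (fun (st : List (List String) × List String) value =>
      match value with
      | none => if st.2 ≠ [] then (st.1 ++ [st.2], []) else st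
      | some v => (st.1, st.2 ++ [v])) ([], [])
  if st.2 ≠ [] then st.1 ++ [st.2] else st.1

-- Source B's second loop: chunk each run by index division, advance start by ceil(len/w)
def approximate_positions_with_sentinels_alt (values : List (Option String)) (position_window_size : Int) : List (Int × String) :=
  ((pvSplitRuns values).foldl (fun (st : Int × List (Int × String)) run =>
      let out := st.2 ++ (PySem.List.enumerate run 0).map (fun iv =>
        (st.1 + (if 1 ≤ position_window_size then PySem.Int.floordiv iv.1 position_window_size else 0), iv.2))
      let adv := if 1 ≤ position_window_size
        then PySem.Int.floordiv ((run.length : Int) + position_window_size - 1) position_window_size else 1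
      (st.1 + adv, out)) (0, [])).2

-- ===== PRECONDITION & SPEC =====
def Spec_approximate_positions_with_sentinels (values : List (Option String)) (position_window_size : Int) (out : List (Int × String)) : Prop := out = approximate_positions_with_sentinels_alt values position_window_size
instance (values : List (Option String)) (position_window_size : Int) (out : List (Int × String)) : Decidable (Spec_approximate_positions_with_sentinels values position_window_size out) := by unfold Spec_approximate_positions_with_sentinels; infer_instance

-- ===== CLAIM (what is proved, stated in full; the proofs are below) =====
def Claim_equal_approximate_positions_with_sentinels : Prop := ∀ (values : List (Option String)) (position_window_size : Int), Dom_approximate_positions_with_sentinels values position_window_size → Spec_approximate_positions_with_sentinels values position_window_size (approximate_positions_with_sentinels values position_window_size)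

-- ===== LEMMAS AND PROOFS =====

-- Named copies of the two ports' loop bodies (definitionally equal to the inline lambdas)
def stepA (w : Int) (st : Int × Int × List (Int × String)) (value : Option String) :
    Int × Int × List (Int × String) :=
  match value with
  | none => if st.2.1 ≠ 0 then (st.1 + 1, 0, st.2.2) else st
  | some v =>
    let current_size := st.2.1 + 1
    let out := st.2.2 ++ [(st.1, v)]
    if current_size = w then (st.1 + 1, 0, out) else (st.1, current_size, out)

def stepS (st : List (List String) × List String) (value : Option String) :
    List (List String) × List String :=
  match value with
  | none => if st.2 ≠ [] then (st.1 ++ [st.2], []) else st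
  | some v => (st.1, st.2 ++ [v])

def stepB (w : Int) (st : Int × List (Int × String)) (run : List String) :
    Int × List (Int × String) :=
  let out := st.2 ++ (PySem.List.enumerate run 0).map (fun iv =>
    (st.1 + (if 1 ≤ w then PySem.Int.floordiv iv.1 w else 0), iv.2))
  let adv := if 1 ≤ w then PySem.Int.floordiv ((run.length : Int) + w - 1) w else 1
  (st.1 + adv, out)

-- Recursive reference for A's loop
def gA (w p s : Int) : List (Option String) → List (Int × String)
  | [] => []
  | none :: vs => if s ≠ 0 then gA w (p + 1) 0 vs else gA w p s vs
  | some v :: vs => (p, v) :: (if s + 1 = w then gA w (p + 1) 0 vs else gA w p (s + 1) vs)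

-- Recursive reference for B's run splitter (with pending run cur)
def rcRuns (cur : List String) : List (Option String) → List (List String)
  | [] => if cur ≠ [] then [cur] else []
  | none :: vs => if cur ≠ [] then cur :: rcRuns [] vs else rcRuns [] vs
  | some v :: vs => rcRuns (cur ++ [v]) vs

-- Recursive reference for B's emitter
def hB (w p : Int) : List (List String) → List (Int × String)
  | [] => []
  | r :: rs =>
    (PySem.List.enumerate r 0).map (fun iv => (p + (if 1 ≤ w then PySem.Int.floordiv iv.1 w else 0), iv.2))
      ++ hB w (p + (if 1 ≤ w then PySem.Int.floordiv ((r.length : Int) + w - 1) w else 1)) rs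

def takeSome : List (Option String) → List String
  | some v :: vs => v :: takeSome vs
  | _ => []

def dropSome : List (Option String) → List (Option String)
  | some _ :: vs => dropSome vs
  | vs => vs

theorem foldA (w : Int) : ∀ (vs : List (Option String)) (p s : Int) (acc : List (Int × String)),
    (vs.foldl (stepA w) (p, s, acc)).2.2 = acc ++ gA w p s vs := by
  intro vs
  induction vs with
  | nil => intro p s acc; simp [gA]
  | cons v vs ih =>
    intro p s acc
    cases v with
    | none =>
      rw [List.foldl_cons]
      by_cases h : s = 0
      · rw [show stepA w (p, s, acc) none = (p, s, acc) from by simp [stepA, h], ih, gA]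
        simp [h]
      · rw [show stepA w (p, s, acc) none = (p + 1, 0, acc) from by simp [stepA, h], ih, gA]
        simp [h]
    | some x =>
      rw [List.foldl_cons]
      by_cases h : s + 1 = w
      · rw [show stepA w (p, s, acc) (some x) = (p + 1, 0, acc ++ [(p, x)]) from by simp [stepA, h],
          ih, gA]
        simp [h]
      · rw [show stepA w (p, s, acc) (some x) = (p, s + 1, acc ++ [(p, x)]) from by simp [stepA, h],
          ih, gA]
        simp [h]

theorem foldSplit : ∀ (vs : List (Option String)) (runs : List (List String)) (cur : List String),
    (if (vs.foldl stepS (runs, cur)).2 ≠ [] then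
        (vs.foldl stepS (runs, cur)).1 ++ [(vs.foldl stepS (runs, cur)).2]
      else (vs.foldl stepS (runs, cur)).1) = runs ++ rcRuns cur vs := by
  intro vs
  induction vs with
  | nil =>
    intro runs cur
    by_cases h : cur = [] <;> simp [rcRuns, h]
  | cons v vs ih =>
    intro runs cur
    cases v with
    | none =>
      rw [List.foldl_cons]
      by_cases h : cur = []
      · rw [show stepS (runs, cur) none = (runs, cur) from by simp [stepS, h], ih, rcRuns]
        simp [h]
      · rw [show stepS (runs, cur) none = (runs ++ [cur], []) from by simp [stepS, h], ih, rcRuns]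
        simp [h]
    | some x =>
      rw [List.foldl_cons, show stepS (runs, cur) (some x) = (runs, cur ++ [x]) from by simp [stepS],
        ih, rcRuns]

theorem foldB (w : Int) : ∀ (rs : List (List String)) (p : Int) (acc : List (Int × String)),
    (rs.foldl (stepB w) (p, acc)).2 = acc ++ hB w p rs := by
  intro rs
  induction rs with
  | nil => intro p acc; simp [hB]
  | cons r rs ih =>
    intro p acc
    rw [List.foldl_cons]
    show (List.foldl (stepB w) (_, _) rs).2 = _
    rw [ih, hB]
    simp [List.append_assoc]

theorem takeSome_dropSome (vs : List (Option String)) :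
    (takeSome vs).map some ++ dropSome vs = vs := by
  induction vs with
  | nil => rfl
  | cons v vs ih =>
    cases v with
    | none => simp [takeSome, dropSome]
    | some x => simp [takeSome, dropSome, ih]

theorem dropSome_shape (vs : List (Option String)) :
    dropSome vs = [] ∨ ∃ d, dropSome vs = none :: d := by
  induction vs with
  | nil => left; rfl
  | cons v vs ih =>
    cases v with
    | none => right; exact ⟨vs, rfl⟩
    | some x => simpa [dropSome] using ih

theorem dropSome_length (vs : List (Option String)) : (dropSome vs).length ≤ vs.length := by
  induction vs with
  | nil => simp [dropSome]
  | cons v vs ih =>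
    cases v with
    | none => simp [dropSome]
    | some x => simp only [dropSome, List.length_cons]; omega

theorem rcRuns_pending : ∀ (vs : List (Option String)) (cur : List String), cur ≠ [] →
    rcRuns cur vs = (cur ++ takeSome vs) :: rcRuns [] (dropSome vs) := by
  intro vs
  induction vs with
  | nil => intro cur h; simp [rcRuns, takeSome, dropSome, h]
  | cons v vs ih =>
    intro cur h
    cases v with
    | none => simp [rcRuns, takeSome, dropSome, h]
    | some x =>
      have := ih (cur ++ [x]) (by simp)
      simp [rcRuns, takeSome, dropSome, this]

theorem succ_divmod (w s : Int) (hw : 0 < w) :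
    ((s + 1) / w = s / w + (if s % w + 1 = w then 1 else 0)) ∧
    ((s + 1) % w = (if s % w + 1 = w then 0 else s % w + 1)) := by
  have h := Int.mul_ediv_add_emod s w
  have hm0 := Int.emod_nonneg s (by omega : w ≠ 0)
  have hm1 := Int.emod_lt_of_pos s hw
  split_ifs with hc
  · have key : 0 + w * (s / w + 1) = s + 1 := by ring_nf; omega
    have := (Int.ediv_emod_unique hw).2 ⟨key, le_rfl, hw⟩
    omega
  · have key : (s % w + 1) + w * (s / w) = s + 1 := by omega
    have := (Int.ediv_emod_unique hw).2 ⟨key, by omega, by omega⟩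
    omega

theorem ceil_div (w n : Int) (hw : 0 < w) :
    (n + w - 1) / w = n / w + (if n % w = 0 then 0 else 1) := by
  have h := Int.mul_ediv_add_emod n w
  have hm0 := Int.emod_nonneg n (by omega : w ≠ 0)
  have hm1 := Int.emod_lt_of_pos n hw
  split_ifs with hc
  · have key : (w - 1) + w * (n / w) = n + w - 1 := by omega
    have := (Int.ediv_emod_unique hw).2 ⟨key, by omega, by omega⟩
    omega
  · have key : (n % w - 1) + w * (n / w + 1) = n + w - 1 := by ring_nf; omega
    have := (Int.ediv_emod_unique hw).2 ⟨key, by omega, by omega⟩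
    omega

theorem gA_run_pos (w : Int) (hw : 1 ≤ w) : ∀ (r : List String) (s p : Int)
    (tail : List (Option String)), 0 ≤ s →
    gA w (p + s / w) (s % w) (r.map some ++ tail)
      = (PySem.List.enumerate r s).map (fun iv => (p + iv.1 / w, iv.2))
        ++ gA w (p + (s + r.length) / w) ((s + (r.length : Int)) % w) tail := by
  intro r
  induction r with
  | nil => intro s p tail hs; simp [PySem.List.enumerate]
  | cons x r ih =>
    intro s p tail hs
    have hw0 : (0 : Int) < w := by omega
    have hsd := succ_divmod w s hw0
    rw [List.map_cons, List.cons_append, gA, PySem.List.enumerate_cons, List.map_cons,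
      List.cons_append]
    congr 1
    have harg : s + ((x :: r).length : Int) = (s + 1) + (r.length : Int) := by
      simp [List.length_cons]; ring
    rw [harg, ← ih (s + 1) p tail (by omega)]
    by_cases hc : s % w + 1 = w
    · have e1 : (s + 1) / w = s / w + 1 := by have := hsd.1; simp [hc] at this; omega
      have e2 : (s + 1) % w = 0 := by have := hsd.2; simp [hc] at this; omega
      rw [if_pos hc, e1, e2, ← add_assoc]
    · have e1 : (s + 1) / w = s / w := by have := hsd.1; simp [hc] at this; omega
      have e2 : (s + 1) % w = s % w + 1 := by have := hsd.2; simp [hc] at this; omega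
      rw [if_neg hc, e1, e2]

theorem gA_run_neg (w : Int) (hw : w ≤ 0) : ∀ (r : List String) (p s : Int)
    (tail : List (Option String)), 0 ≤ s →
    gA w p s (r.map some ++ tail) = r.map (fun v => (p, v)) ++ gA w p (s + r.length) tail := by
  intro r
  induction r with
  | nil => intro p s tail hs; simp
  | cons x r ih =>
    intro p s tail hs
    rw [List.map_cons, List.cons_append, gA, if_neg (by omega : ¬ s + 1 = w), List.map_cons,
      List.cons_append, ih p (s + 1) tail (by omega)]
    have harg : s + 1 + (r.length : Int) = s + ((x :: r).length : Int) := by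
      simp [List.length_cons]; ring
    rw [harg]

theorem enum_map_const (p : Int) (l : List String) (a : Int) :
    (PySem.List.enumerate l a).map (fun iv => (p, iv.2)) = l.map (fun v => (p, v)) := by
  rw [show (fun iv : Int × String => (p, iv.2)) = (fun v : String => (p, v)) ∘ (fun iv : Int × String => iv.2)
      from rfl, ← List.map_map, PySem.List.map_snd_enumerate]

theorem gA_eq_hB (w : Int) : ∀ (vs : List (Option String)) (p : Int),
    gA w p 0 vs = hB w p (rcRuns [] vs) := by
  suffices H : ∀ (n : Nat) (vs : List (Option String)), vs.length ≤ n → ∀ p,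
      gA w p 0 vs = hB w p (rcRuns [] vs) from fun vs p => H vs.length vs le_rfl p
  intro n
  induction n with
  | zero =>
    intro vs h p
    have : vs = [] := by cases vs <;> simp_all
    subst this; simp [gA, rcRuns, hB]
  | succ n ih =>
    intro vs hlen p
    cases vs with
    | nil => simp [gA, rcRuns, hB]
    | cons v vs' =>
      have hlen' : vs'.length ≤ n := by simp at hlen; omega
      cases v with
      | none =>
        rw [gA, if_neg (by simp), rcRuns, if_neg (by simp)]
        exact ih vs' hlen' p
      | some x =>
        have hdec : (takeSome vs').map some ++ dropSome vs' = vs' := takeSome_dropSome vs'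
        have hrc : rcRuns [] (some x :: vs')
            = (x :: takeSome vs') :: rcRuns [] (dropSome vs') := by
          rw [rcRuns, rcRuns_pending vs' ([] ++ [x]) (by simp)]
          simp
        have hNpos : (0 : Int) < ((x :: takeSome vs').length : Int) := by
          simp [List.length_cons]
        have hcontlen : ∀ d', dropSome vs' = none :: d' → d'.length ≤ n := by
          intro d' hd'
          have := dropSome_length vs'
          rw [hd'] at this
          simp at this; omega
        have hrcd : ∀ d', rcRuns [] (none :: d') = rcRuns [] d' := by
          intro d'; rw [rcRuns, if_neg (by simp)]
        rw [hrc, hB]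
        by_cases hw1 : 1 ≤ w
        · have hw0 : (0 : Int) < w := by omega
          have e0 : gA w p 0 (some x :: vs')
              = gA w (p + 0 / w) (0 % w) ((x :: takeSome vs').map some ++ dropSome vs') := by
            rw [List.map_cons, List.cons_append, hdec]
            norm_num
          rw [e0, gA_run_pos w hw1 (x :: takeSome vs') 0 p (dropSome vs') le_rfl]
          congr 1
          · simp [hw1, PySem.Int.floordiv_eq_ediv_of_pos hw0]
          · rw [if_pos hw1, PySem.Int.floordiv_eq_ediv_of_pos hw0, ceil_div _ _ hw0]
            rcases dropSome_shape vs' with h0 | ⟨d', hd'⟩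
            · rw [h0]; simp [gA, rcRuns, hB]
            · rw [hd', gA, hrcd d', ← ih d' (hcontlen d' hd')]
              by_cases hm : ((x :: takeSome vs').length : Int) % w = 0
              · rw [if_neg (by simpa using hm)]
                rw [show (0 : Int) + ((x :: takeSome vs').length : Int)
                    = ((x :: takeSome vs').length : Int) from by ring] at *
                rw [hm]
                norm_num
              · rw [show (0 : Int) + ((x :: takeSome vs').length : Int)
                    = ((x :: takeSome vs').length : Int) from by ring]
                rw [if_pos (by simpa using hm), if_neg hm]
                ring_nf
        · have e0 : gA w p 0 (some x :: vs')
              = gA w p 0 ((x :: takeSome vs').map some ++ dropSome vs') := by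
            rw [List.map_cons, List.cons_append, hdec]
          rw [e0, gA_run_neg w (by omega) (x :: takeSome vs') p 0 (dropSome vs') le_rfl]
          simp only [if_neg hw1]
          congr 1
          · rw [← enum_map_const p (x :: takeSome vs') 0]
            simp
          · rcases dropSome_shape vs' with h0 | ⟨d', hd'⟩
            · rw [h0]; simp [gA, rcRuns, hB]
            · rw [hd', gA, if_pos (by omega), hrcd d', ih d' (hcontlen d' hd')]

-- ===== VERDICT (by name: the statement is the Claim_ definition above) =====
theorem approximate_positions_with_sentinels_spec : Claim_equal_approximate_positions_with_sentinels := by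
  intro values w _
  show approximate_positions_with_sentinels values w = approximate_positions_with_sentinels_alt values w
  have hA : approximate_positions_with_sentinels values w = gA w 0 0 values := by
    show (List.foldl (stepA w) ((0 : Int), (0 : Int), ([] : List (Int × String))) values).2.2 = _
    rw [foldA]; rfl
  have hS : pvSplitRuns values = rcRuns [] values := by
    show (if (List.foldl stepS ([], []) values).2 ≠ [] then
        (List.foldl stepS ([], []) values).1 ++ [(List.foldl stepS ([], []) values).2]
      else (List.foldl stepS ([], []) values).1) = _
    rw [foldSplit]; rfl
  have hBp : approximate_positions_with_sentinels_alt values w = hB w 0 (rcRuns [] values) := by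
    show (List.foldl (stepB w) ((0 : Int), ([] : List (Int × String))) (pvSplitRuns values)).2 = _
    rw [hS, foldB]; rfl
  rw [hA, hBp]
  exact gA_eq_hB w values 0
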